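-- pv_equiv track=rewrite | github.com/muzzi85/clipmodeldeployedtoazure | room_classification.py | classify_room_from_objects_multi_label
-- ===== SOURCE A (Python) =====
-- def classify_room_from_objects_multi_label(objects_dict):
--     """Infer room type(s) from detected objects. Returns multiple types if necessary."""
--     # Lowercase keys and strip spaces
--     detected = {k.lower().strip(): v for k, v in objects_dict.items()}
--
--     categories = {
--         "floorplan": ["a floorplan"],
--         "bedroom": ["a bed", "a single bed", "a double bed", "a duvet", "a bedroom"],
--         "bathroom": ["a bath", "a bathroom basin", "a shower head", "a toilet seat", "a single ended bath", "a bathroom", "a tub"],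
--         "living/sitting room": ["a sofa", "a leather sofa", "a dinning table and chairs","a living room"],
--         "outdoor": ["a garden", "a tree", "a car"],
--         "kitchen": ["a refrigerator", "a kitchen stove", "a stove vent hood", "a kitchen", "a kitchen sink","a kitchen", "a cabinet and sink"],
--         "gym": ["a gym", "a training machine"]
--
--     }
--
--     matched = []
--
--     for room, objects in categories.items():
--         # Normalize category objects
--         normalized_objects = [obj.lower().strip() for obj in objects]
--         if any(obj in detected for obj in normalized_objects):
--             matched.append(room)
--
--     if not matched:
--         return "unknown"
--
--     return " & ".join(matched) if len(matched) > 1 else matched[0]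
-- ===== SOURCE B (Python) =====
-- _CATEGORIES = {
--     "floorplan": ["a floorplan"],
--     "bedroom": ["a bed", "a single bed", "a double bed", "a duvet", "a bedroom"],
--     "bathroom": ["a bath", "a bathroom basin", "a shower head", "a toilet seat", "a single ended bath", "a bathroom", "a tub"],
--     "living/sitting room": ["a sofa", "a leather sofa", "a dinning table and chairs", "a living room"],
--     "outdoor": ["a garden", "a tree", "a car"],
--     "kitchen": ["a refrigerator", "a kitchen stove", "a stove vent hood", "a kitchen", "a kitchen sink", "a kitchen", "a cabinet and sink"],
--     "gym": ["a gym", "a training machine"],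
-- }
--
-- # Inverted index: normalized object string -> its room.
-- _INDEX = {obj.lower().strip(): room for room, objs in _CATEGORIES.items() for obj in objs}
--
--
-- def classify_room_from_objects_multi_label(objects_dict):
--     """Infer room type(s) from detected objects. Returns multiple types if necessary."""
--     matched = set()
--     for k in objects_dict:
--         room = _INDEX.get(k.lower().strip())
--         if room is not None:
--             matched.add(room)
--     rooms = [room for room in _CATEGORIES if room in matched]
--     if not rooms:
--         return "unknown"
--     return " & ".join(rooms) if len(rooms) > 1 else rooms[0]
-- ===== Notes on version B (the rewrite author's own statement) =====
-- stated objective: idiomatic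
-- what changed: B precomputes an inverted index from normalized object string to room and makes one pass over the detected keys collecting matched rooms into a set, then emits rooms in category-declaration order, instead of A's per-category scan with membership tests against a detected dict rebuilt per call.
import Mathlib
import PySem

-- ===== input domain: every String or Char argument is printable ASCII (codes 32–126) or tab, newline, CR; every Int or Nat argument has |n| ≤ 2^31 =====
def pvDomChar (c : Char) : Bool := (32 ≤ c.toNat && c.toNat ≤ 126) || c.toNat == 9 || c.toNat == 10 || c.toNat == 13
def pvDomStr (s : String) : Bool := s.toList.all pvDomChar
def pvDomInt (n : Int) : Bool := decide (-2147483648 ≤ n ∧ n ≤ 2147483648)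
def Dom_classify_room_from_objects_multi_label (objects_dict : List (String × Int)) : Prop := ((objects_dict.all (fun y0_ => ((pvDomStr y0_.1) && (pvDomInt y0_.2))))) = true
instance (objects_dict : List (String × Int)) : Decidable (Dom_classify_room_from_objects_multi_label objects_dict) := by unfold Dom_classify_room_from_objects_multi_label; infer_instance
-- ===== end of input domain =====

-- B replaces A's per-category scan over a rebuilt detected dict by one pass over the
-- detected keys against a precomputed inverted index (object -> room), then emits the
-- matched rooms in category-declaration order (objective: idiomatic).

-- k.lower().strip()
def pvNorm (s : String) : String := PySem.Str.strip (PySem.Str.lower s)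

-- the categories dict literal, shared data of both programs
def pvCategories : List (String × List String) :=
  [("floorplan", ["a floorplan"]),
   ("bedroom", ["a bed", "a single bed", "a double bed", "a duvet", "a bedroom"]),
   ("bathroom", ["a bath", "a bathroom basin", "a shower head", "a toilet seat", "a single ended bath", "a bathroom", "a tub"]),
   ("living/sitting room", ["a sofa", "a leather sofa", "a dinning table and chairs", "a living room"]),
   ("outdoor", ["a garden", "a tree", "a car"]),
   ("kitchen", ["a refrigerator", "a kitchen stove", "a stove vent hood", "a kitchen", "a kitchen sink", "a kitchen", "a cabinet and sink"]),
   ("gym", ["a gym", "a training machine"])]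

-- ===== PORT A =====
-- matched[0] is guarded by 'if not matched' in the Python, so headD "" is exact there.
def classify_room_from_objects_multi_label (objects_dict : List (String × Int)) : String :=
  let detected : PySem.Dict String Int :=
    objects_dict.foldl (fun d kv => d.insert (pvNorm kv.1) kv.2) PySem.Dict.empty
  let matched : List String :=
    pvCategories.foldl (fun m rc =>
      let normalized_objects := rc.2.map pvNorm
      if normalized_objects.any (fun o => detected.contains o) then m ++ [rc.1] else m) []
  if matched = [] then "unknown"
  else if 1 < matched.length then PySem.Str.join " & " matched else matched.headD ""

-- ===== PORT B =====
-- the inverted index {obj.lower().strip(): room for room, objs in _CATEGORIES.items() for obj in objs}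
def pvIndex : PySem.Dict String String :=
  pvCategories.foldl (fun d rc => rc.2.foldl (fun d o => d.insert (pvNorm o) rc.1) d) PySem.Dict.empty

def classify_room_from_objects_multi_label_alt (objects_dict : List (String × Int)) : String :=
  let matched : PySem.Set String :=
    objects_dict.foldl (fun s kv =>
      match pvIndex.get? (pvNorm kv.1) with
      | some room => PySem.Set.add s room
      | none => s) PySem.Set.empty
  let rooms : List String :=
    (pvCategories.map (·.1)).filter (fun room => PySem.Set.contains matched room)
  if rooms = [] then "unknown"
  else if 1 < rooms.length then PySem.Str.join " & " rooms else rooms.headD ""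

-- ===== PRECONDITION & SPEC =====
def Spec_classify_room_from_objects_multi_label (objects_dict : List (String × Int)) (out : String) : Prop := out = classify_room_from_objects_multi_label_alt objects_dict
instance (objects_dict : List (String × Int)) (out : String) : Decidable (Spec_classify_room_from_objects_multi_label objects_dict out) := by unfold Spec_classify_room_from_objects_multi_label; infer_instance

-- ===== CLAIM (what is proved, stated in full; the proofs are below) =====
def Claim_equal_classify_room_from_objects_multi_label : Prop := ∀ (objects_dict : List (String × Int)), Dom_classify_room_from_objects_multi_label objects_dict → Spec_classify_room_from_objects_multi_label objects_dict (classify_room_from_objects_multi_label objects_dict)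

-- ===== LEMMAS AND PROOFS =====

-- every normalized category object is a key of the inverted index
set_option maxRecDepth 100000 in
theorem pv_cover : ∀ rc ∈ pvCategories, ∀ s ∈ rc.2.map pvNorm, s ∈ pvIndex.keys := by decide

-- on the keys of the index, get? returns room r exactly for r's normalized objects
set_option maxRecDepth 100000 in
theorem pv_bridge : ∀ rc ∈ pvCategories, ∀ s ∈ pvIndex.keys,
    (pvIndex.get? s = some rc.1 ↔ s ∈ rc.2.map pvNorm) := by decide

theorem pv_get_mem_keys {s r : String} (h : pvIndex.get? s = some r) : s ∈ pvIndex.keys := by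
  rw [← PySem.Dict.contains_iff_mem_keys, PySem.Dict.contains_eq_isSome_get?, h]
  rfl

-- characterization of A's detected dict membership
theorem pv_detected_contains (od : List (String × Int)) (o : String) :
    (od.foldl (fun d kv => d.insert (pvNorm kv.1) kv.2) PySem.Dict.empty).contains o = true ↔
      ∃ kv ∈ od, pvNorm kv.1 = o := by
  rw [PySem.Dict.contains_iff_mem_keys, PySem.Dict.keys_foldl_insert_key]
  simp [PySem.Dict.keys_empty, PySem.Set.update_nil_left, PySem.Set.mem_ofList]

-- characterization of B's matched set
theorem pv_matched_mem (od : List (String × Int)) (s0 : PySem.Set String) (r : String) :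
    r ∈ od.foldl (fun s kv =>
      match pvIndex.get? (pvNorm kv.1) with
      | some room => PySem.Set.add s room
      | none => s) s0 ↔ r ∈ s0 ∨ ∃ kv ∈ od, pvIndex.get? (pvNorm kv.1) = some r := by
  induction od generalizing s0 with
  | nil => simp
  | cons kv rest ih =>
    rw [List.foldl_cons, ih]
    cases h : pvIndex.get? (pvNorm kv.1) with
    | none =>
      simp only [List.mem_cons]
      constructor
      · rintro (hs | ⟨x, hx, hg⟩)
        · exact Or.inl hs
        · exact Or.inr ⟨x, Or.inr hx, hg⟩
      · rintro (hs | ⟨x, (rfl | hx), hg⟩)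
        · exact Or.inl hs
        · rw [h] at hg; simp at hg
        · exact Or.inr ⟨x, hx, hg⟩
    | some room =>
      simp only [PySem.Set.mem_add, List.mem_cons]
      constructor
      · rintro (⟨hs | rfl⟩ | ⟨x, hx, hg⟩)
        · exact Or.inl hs
        · exact Or.inr ⟨kv, Or.inl rfl, h⟩
        · exact Or.inr ⟨x, Or.inr hx, hg⟩
      · rintro (hs | ⟨x, (rfl | hx), hg⟩)
        · exact Or.inl (Or.inl hs)
        · rw [h] at hg; injection hg with e; exact Or.inl (Or.inr e.symm)
        · exact Or.inr ⟨x, hx, hg⟩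

-- the per-category condition of A equals B's set membership
theorem pv_cond_eq (od : List (String × Int)) (rc : String × List String) (hrc : rc ∈ pvCategories) :
    ((rc.2.map pvNorm).any (fun o =>
        (od.foldl (fun d kv => d.insert (pvNorm kv.1) kv.2) PySem.Dict.empty).contains o))
      = PySem.Set.contains
          (od.foldl (fun s kv =>
            match pvIndex.get? (pvNorm kv.1) with
            | some room => PySem.Set.add s room
            | none => s) PySem.Set.empty) rc.1 := by
  rw [Bool.eq_iff_iff, List.any_eq_true, PySem.Set.contains_iff, pv_matched_mem]
  constructor
  · rintro ⟨o, ho, hc⟩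
    obtain ⟨kv, hkv, rfl⟩ := (pv_detected_contains od o).mp hc
    exact Or.inr ⟨kv, hkv, (pv_bridge rc hrc _ (pv_cover rc hrc _ ho)).mpr ho⟩
  · rintro (hs | ⟨kv, hkv, hg⟩)
    · exact absurd hs (List.not_mem_nil)
    · have hk := pv_get_mem_keys hg
      have ho := (pv_bridge rc hrc _ hk).mp hg
      exact ⟨pvNorm kv.1, ho, (pv_detected_contains od _).mpr ⟨kv, hkv, rfl⟩⟩

-- ===== VERDICT (by name: the statement is the Claim_ definition above) =====
theorem classify_room_from_objects_multi_label_spec : Claim_equal_classify_room_from_objects_multi_label := by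
  intro od _
  unfold Spec_classify_room_from_objects_multi_label
  unfold classify_room_from_objects_multi_label classify_room_from_objects_multi_label_alt
  have h1 := pv_cond_eq od ("floorplan", ["a floorplan"]) (by decide)
  have h2 := pv_cond_eq od ("bedroom", ["a bed", "a single bed", "a double bed", "a duvet", "a bedroom"]) (by decide)
  have h3 := pv_cond_eq od ("bathroom", ["a bath", "a bathroom basin", "a shower head", "a toilet seat", "a single ended bath", "a bathroom", "a tub"]) (by decide)
  have h4 := pv_cond_eq od ("living/sitting room", ["a sofa", "a leather sofa", "a dinning table and chairs", "a living room"]) (by decide)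
  have h5 := pv_cond_eq od ("outdoor", ["a garden", "a tree", "a car"]) (by decide)
  have h6 := pv_cond_eq od ("kitchen", ["a refrigerator", "a kitchen stove", "a stove vent hood", "a kitchen", "a kitchen sink", "a kitchen", "a cabinet and sink"]) (by decide)
  have h7 := pv_cond_eq od ("gym", ["a gym", "a training machine"]) (by decide)
  simp only [pvCategories, List.foldl_cons, List.foldl_nil, List.map_cons, List.map_nil,
    List.filter_cons, List.filter_nil] at h1 h2 h3 h4 h5 h6 h7 ⊢
  rw [h1, h2, h3, h4, h5, h6, h7]
  generalize (PySem.Set.contains _ "floorplan") = b1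
  generalize (PySem.Set.contains _ "bedroom") = b2
  generalize (PySem.Set.contains _ "bathroom") = b3
  generalize (PySem.Set.contains _ "living/sitting room") = b4
  generalize (PySem.Set.contains _ "outdoor") = b5
  generalize (PySem.Set.contains _ "kitchen") = b6
  generalize (PySem.Set.contains _ "gym") = b7
  cases b1 <;> cases b2 <;> cases b3 <;> cases b4 <;> cases b5 <;> cases b6 <;> cases b7 <;> rfl
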